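-- pv_equiv track=rewrite | github.com/CMSC122GroupProject/CMSC122_Group_Project | asterisk_pre_algo.py | query_select
-- ===== SOURCE A (Python) =====
-- dict_api = {'yelp' : ['name_id', 'price', 'rating'], 'time' : ['m_open', 'm_closed', 't_open', 't_closed', 'w_open', 'w_closed', 'r_open', 'r_closed', 'f_open',
--             'f_closed', 'sat_open', 'sat_closed', 'sun_open', 'sun_closed', 'name_id'], 'maps' : ['lon', 'lat', 'name_id']}
--
-- desired_output = ['name_id']
--
-- tables = ['yelp', 'time', 'maps']
--
-- def query_relations(sample):
--     relation_list = []
--     relations = list(dict_api.keys())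
--     samples = list(sample.keys())
--     for param in samples:
--         for table in tables:
--             if param in dict_api[table] and table in relation_list:
--                 break
--             elif param in dict_api[table] and table not in relation_list:
--                 relation_list.append(table)
--
--     return  relation_list
--
-- def query_select(sample):
--     relations = query_relations(sample)
--     select_list = []
--     count = []
--     samples = list(sample.keys())
--     for param in samples:
--         for table in relations:
--             if param in dict_api[table] and param in desired_output and param not in count:
--                 select_list.append(".".join((table, param)))
--                 count.append(param)
--     return select_list
-- ===== SOURCE B (Python) =====
-- dict_api = {'yelp' : ['name_id', 'price', 'rating'], 'time' : ['m_open', 'm_closed', 't_open', 't_closed', 'w_open', 'w_closed', 'r_open', 'r_closed', 'f_open',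
--             'f_closed', 'sat_open', 'sat_closed', 'sun_open', 'sun_closed', 'name_id'], 'maps' : ['lon', 'lat', 'name_id']}
--
-- desired_output = ['name_id']
--
-- tables = ['yelp', 'time', 'maps']
--
-- def query_relations(sample):
--     relation_list = []
--     for param in sample.keys():
--         for table in tables:
--             if param in dict_api[table]:
--                 if table in relation_list:
--                     break
--                 relation_list.append(table)
--     return relation_list
--
-- def query_select(sample):
--     relations = query_relations(sample)
--     # reverse index: column -> first relation that provides it (reversed, so earlier wins)
--     first_table = {}
--     for t in reversed(relations):
--         for col in dict_api[t]:
--             first_table[col] = t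
--     return [first_table[p] + "." + p for p in desired_output
--             if p in sample and p in first_table]
-- ===== Notes on version B (the rewrite author's own statement) =====
-- stated objective: alternative
-- what changed: B builds a reverse index (column -> first providing relation) as a dict once and then produces the output by a comprehension over desired_output, instead of A's nested scan of all sample keys with a `count` dedup accumulator.
import Mathlib
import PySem

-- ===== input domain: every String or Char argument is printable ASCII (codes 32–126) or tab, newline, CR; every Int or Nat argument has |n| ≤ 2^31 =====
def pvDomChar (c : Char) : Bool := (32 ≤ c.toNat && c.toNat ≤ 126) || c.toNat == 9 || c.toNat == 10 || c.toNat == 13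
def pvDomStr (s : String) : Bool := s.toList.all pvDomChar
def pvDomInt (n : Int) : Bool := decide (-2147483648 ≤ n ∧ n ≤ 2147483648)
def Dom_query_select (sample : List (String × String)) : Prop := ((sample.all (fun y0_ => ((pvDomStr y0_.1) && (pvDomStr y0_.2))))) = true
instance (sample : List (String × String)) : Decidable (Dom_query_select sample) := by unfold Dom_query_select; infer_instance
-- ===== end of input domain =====

-- B builds a reverse index (column -> first providing relation) as a dict and emits the output by a
-- comprehension over desired_output, replacing A's nested sample-keys scan with a `count` dedup
-- accumulator; objective: alternative. Same return values.

-- ===== PORT A =====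
-- module-level constants
def dict_api : PySem.Dict String (List String) :=
  PySem.Dict.ofList
    [("yelp", ["name_id", "price", "rating"]),
     ("time", ["m_open", "m_closed", "t_open", "t_closed", "w_open", "w_closed", "r_open",
               "r_closed", "f_open", "f_closed", "sat_open", "sat_closed", "sun_open",
               "sun_closed", "name_id"]),
     ("maps", ["lon", "lat", "name_id"])]

def desired_output : List String := ["name_id"]

def tables : List String := ["yelp", "time", "maps"]

-- dict_api[table]; exact here since every table looked up is a key of dict_api ('yelp'/'time'/'maps')
def cols (t : String) : List String := PySem.Dict.getD dict_api t []

-- the keys of the sample dict, in insertion order (first occurrences)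
def sampleKeys (sample : List (String × String)) : List String :=
  PySem.List.dedup (sample.map Prod.fst)

-- inner `for table in tables` loop of query_relations, with its `break`
def qrInner (param : String) : List String → List String → List String
  | [], rl => rl
  | t :: rest, rl =>
    if (cols t).contains param && rl.contains t then rl  -- break
    else if (cols t).contains param && !(rl.contains t) then qrInner param rest (rl ++ [t])
    else qrInner param rest rl

def query_relations (sample : List (String × String)) : List String :=
  (sampleKeys sample).foldl (fun rl param => qrInner param tables rl) []

def query_select (sample : List (String × String)) : List String :=
  let relations := query_relations sample
  let st := (sampleKeys sample).foldl
    (fun (st : List String × List String) param =>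
      relations.foldl
        (fun (st : List String × List String) table =>
          if (cols table).contains param && desired_output.contains param
              && !(st.2.contains param) then
            (st.1 ++ [table ++ "." ++ param], st.2 ++ [param])
          else st) st)
    ([], [])
  st.1

-- ===== PORT B =====
-- B-side view of the module constant dict_api, used as a plain association list
def apiB : List (String × List String) :=
  [("yelp", ["name_id", "price", "rating"]),
   ("time", ["m_open", "m_closed", "t_open", "t_closed", "w_open", "w_closed", "r_open",
             "r_closed", "f_open", "f_closed", "sat_open", "sat_closed", "sun_open",
             "sun_closed", "name_id"]),
   ("maps", ["lon", "lat", "name_id"])]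

def colsB (t : String) : List String := (List.lookup t apiB).getD []

-- inner `for table in tables` loop of B's query_relations (nested if with break)
def tblScan (p : String) (rl : List String) : List String → List String
  | [] => rl
  | t :: ts =>
    if (colsB t).any (· == p) then
      if rl.any (· == t) then rl else tblScan p (rl ++ [t]) ts
    else tblScan p rl ts

-- outer `for param in sample.keys()` loop of B's query_relations
def relWalk (rl : List String) : List String → List String
  | [] => rl
  | p :: ps => relWalk (tblScan p rl tables) ps

def relationsB (sample : List (String × String)) : List String :=
  relWalk [] (PySem.List.dedup (sample.map (fun kv => kv.1)))

-- `for t in reversed(relations): for col in dict_api[t]: first_table[col] = t`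
def buildIdx (rels : List String) : PySem.Dict String String :=
  rels.reverse.foldl (fun d t => (colsB t).foldl (fun d c => d.insert c t) d) PySem.Dict.empty

def query_select_alt (sample : List (String × String)) : List String :=
  let idx := buildIdx (relationsB sample)
  desired_output.filterMap (fun p =>
    if sample.any (fun kv => kv.1 == p) then
      (idx.get? p).map (fun t => t ++ "." ++ p)
    else none)

-- ===== PRECONDITION & SPEC =====
def Spec_query_select (sample : List (String × String)) (out : List String) : Prop := out = query_select_alt sample
instance (sample : List (String × String)) (out : List String) : Decidable (Spec_query_select sample out) := by unfold Spec_query_select; infer_instance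

-- ===== CLAIM (what is proved, stated in full; the proofs are below) =====
def Claim_equal_query_select : Prop := ∀ (sample : List (String × String)), Dom_query_select sample → Spec_query_select sample (query_select sample)

-- ===== LEMMAS AND PROOFS =====

-- every element qrInner adds comes from the table list it scans
theorem qrInner_mem (param x : String) (ts rl : List String)
    (hx : x ∈ qrInner param ts rl) : x ∈ rl ∨ x ∈ ts := by
  induction ts generalizing rl with
  | nil => simp [qrInner] at hx; exact Or.inl hx
  | cons t rest ih =>
    simp only [qrInner] at hx
    split_ifs at hx with h1 h2
    · exact Or.inl hx
    · rcases ih _ hx with h | h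
      · rcases List.mem_append.1 h with h | h
        · exact Or.inl h
        · simp at h; subst h; simp
      · simp [h]
    · rcases ih _ hx with h | h
      · exact Or.inl h
      · simp [h]

theorem foldl_qr_mem (ks : List String) (rl : List String)
    (hrl : ∀ y ∈ rl, y ∈ tables) :
    ∀ z ∈ ks.foldl (fun rl param => qrInner param tables rl) rl, z ∈ tables := by
  induction ks generalizing rl with
  | nil => intro z hz; exact hrl z hz
  | cons a as ih =>
    intro z hz
    rw [List.foldl_cons] at hz
    refine ih _ (fun y hy => ?_) z hz
    rcases qrInner_mem a y tables rl hy with h | h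
    · exact hrl y h
    · exact h

theorem query_relations_mem (sample : List (String × String)) (x : String)
    (hx : x ∈ query_relations sample) : x ∈ tables := by
  unfold query_relations at hx
  exact foldl_qr_mem _ [] (by simp) x hx

theorem cols_name_id (t : String) (ht : t ∈ tables) :
    (cols t).contains "name_id" = true := by
  fin_cases ht <;> decide

theorem colsB_eq_cols (t : String) (ht : t ∈ tables) : colsB t = cols t := by
  fin_cases ht <;> decide

-- A's inner fold is the identity once param is already in count
theorem innerA_absorb (param : String) (R : List String) (st : List String × List String)
    (h : st.2.contains param = true) :
    R.foldl
      (fun (st : List String × List String) table =>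
        if (cols table).contains param && desired_output.contains param
            && !(st.2.contains param) then
          (st.1 ++ [table ++ "." ++ param], st.2 ++ [param])
        else st) st = st := by
  induction R with
  | nil => rfl
  | cons t rest ih =>
    simp only [List.contains_iff_mem] at h
    rw [List.foldl_cons, if_neg (by simp [h])]
    exact ih

-- A's inner fold is the identity when param is not a desired column
theorem innerA_not_desired (param : String) (hparam : param ≠ "name_id")
    (R : List String) (st : List String × List String) :
    R.foldl
      (fun (st : List String × List String) table =>
        if (cols table).contains param && desired_output.contains param
            && !(st.2.contains param) then
          (st.1 ++ [table ++ "." ++ param], st.2 ++ [param])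
        else st) st = st := by
  induction R with
  | nil => rfl
  | cons t rest ih =>
    rw [List.foldl_cons]
    rw [if_neg (by simp [desired_output, hparam])]
    exact ih

-- A's inner fold on a fresh "name_id": appends head-of-relations.name_id and records it
theorem innerA_fresh (R : List String) (hR : ∀ t ∈ R, (cols t).contains "name_id" = true)
    (sl cnt : List String) (hc : cnt.contains "name_id" = false) :
    R.foldl
      (fun (st : List String × List String) table =>
        if (cols table).contains "name_id" && desired_output.contains "name_id"
            && !(st.2.contains "name_id") then
          (st.1 ++ [table ++ "." ++ "name_id"], st.2 ++ ["name_id"])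
        else st) (sl, cnt) =
    match R with
    | [] => (sl, cnt)
    | t :: _ => (sl ++ [t ++ "." ++ "name_id"], cnt ++ ["name_id"]) := by
  cases R with
  | nil => rfl
  | cons t rest =>
    rw [List.foldl_cons]
    rw [if_pos (by simp [desired_output]; exact ⟨by simpa using hR t (by simp), by simpa using hc⟩)]
    exact innerA_absorb _ rest _ (by simp)

-- outer fold of A starting from a state already containing "name_id" in count is the identity
theorem outerA_absorb (R : List String) (ks : List String)
    (st : List String × List String) (h : st.2.contains "name_id" = true) :
    ks.foldl
      (fun (st : List String × List String) param =>
        R.foldl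
          (fun (st : List String × List String) table =>
            if (cols table).contains param && desired_output.contains param
                && !(st.2.contains param) then
              (st.1 ++ [table ++ "." ++ param], st.2 ++ [param])
            else st) st) st = st := by
  induction ks with
  | nil => rfl
  | cons k ks ih =>
    rw [List.foldl_cons]
    by_cases hk : k = "name_id"
    · subst hk; rw [innerA_absorb _ _ _ h]; exact ih
    · rw [innerA_not_desired k hk]; exact ih

-- characterization of A's outer fold from the initial state
theorem outerA_char (R : List String) (hR : ∀ t ∈ R, (cols t).contains "name_id" = true)
    (ks : List String) :
    ks.foldl
      (fun (st : List String × List String) param =>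
        R.foldl
          (fun (st : List String × List String) table =>
            if (cols table).contains param && desired_output.contains param
                && !(st.2.contains param) then
              (st.1 ++ [table ++ "." ++ param], st.2 ++ [param])
            else st) st) ([], []) =
    (if "name_id" ∈ ks then
      match R with
      | [] => (([] : List String), ([] : List String))
      | t :: _ => ([t ++ "." ++ "name_id"], ["name_id"])
     else ([], [])) := by
  induction ks with
  | nil => simp
  | cons k ks ih =>
    rw [List.foldl_cons]
    by_cases hk : k = "name_id"
    · subst hk
      have hfresh := innerA_fresh R hR [] [] (by decide)
      rw [hfresh]
      cases R with
      | nil => rw [ih]; simp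
      | cons t rest =>
        simp only
        rw [outerA_absorb _ ks _ (by simp)]
        simp
    · rw [innerA_not_desired k hk, ih]
      simp [Ne.symm hk]

theorem mem_sampleKeys (sample : List (String × String)) (x : String) :
    x ∈ sampleKeys sample ↔ x ∈ sample.map Prod.fst := by
  simp [sampleKeys]

-- B's inner table scan computes the same list as A's
theorem tblScan_eq_qrInner (p : String) (ts : List String) (hts : ∀ t ∈ ts, t ∈ tables) :
    ∀ rl, tblScan p rl ts = qrInner p ts rl := by
  induction ts with
  | nil => intro rl; rfl
  | cons t rest ih =>
    intro rl
    have ht : colsB t = cols t := colsB_eq_cols t (hts t (by simp))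
    have hrest : ∀ t ∈ rest, t ∈ tables := fun x hx => hts x (by simp [hx])
    simp only [tblScan, qrInner, ht]
    by_cases hp : p ∈ cols t <;> by_cases hr : t ∈ rl <;>
      simp [hp, hr, ih hrest]

theorem relWalk_eq (ks rl : List String) :
    relWalk rl ks = ks.foldl (fun rl param => qrInner param tables rl) rl := by
  induction ks generalizing rl with
  | nil => rfl
  | cons k ks ih =>
    simp only [relWalk, List.foldl_cons, ih,
      tblScan_eq_qrInner k tables (fun _ h => h) rl]

theorem relationsB_eq (sample : List (String × String)) :
    relationsB sample = query_relations sample := by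
  unfold relationsB query_relations sampleKeys
  exact relWalk_eq _ _

-- lookup after the per-table insert loop
theorem idx_inner_get (q t : String) (cs : List String) (d : PySem.Dict String String) :
    (cs.foldl (fun d c => d.insert c t) d).get? q =
      if cs.contains q then some t else d.get? q := by
  induction cs generalizing d with
  | nil => simp
  | cons c cs ih =>
    rw [List.foldl_cons, ih]
    by_cases hc : cs.contains q = true
    · simp [hc, List.contains_iff_mem] at *
      simp [hc]
    · simp only [eq_false_of_ne_true hc]
      rw [PySem.Dict.get?_insert]
      by_cases hq : q = c
      · subst hq; simp [List.contains_iff_mem]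
      · simp [List.contains_iff_mem, hq, hc, Ne.symm hq]
        intro h; exact absurd (by simp [List.contains_iff_mem, h]) hc

-- lookup of "name_id" after the whole reversed build loop: the last processed provider wins
theorem idx_outer_get (L : List String) (d : PySem.Dict String String)
    (hL : ∀ t ∈ L, (colsB t).contains "name_id" = true) :
    (L.foldl (fun d t => (colsB t).foldl (fun d c => d.insert c t) d) d).get? "name_id" =
      match L.getLast? with
      | some t => some t
      | none => d.get? "name_id" := by
  induction L generalizing d with
  | nil => rfl
  | cons t L ih =>
    cases L with
    | nil =>
      rw [List.foldl_cons, List.foldl_nil, idx_inner_get, if_pos (hL t (by simp))]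
      rfl
    | cons u M =>
      rw [List.foldl_cons, ih _ (fun x hx => hL x (List.mem_cons_of_mem t hx))]
      simp only [List.getLast?_cons_cons]
      cases hgl : (u :: M).getLast? with
      | some v => simp [hgl]
      | none => simp [List.getLast?_eq_none_iff] at hgl

theorem buildIdx_get (R : List String) (hR : ∀ t ∈ R, (colsB t).contains "name_id" = true) :
    (buildIdx R).get? "name_id" =
      match R.head? with
      | some t => some t
      | none => none := by
  unfold buildIdx
  rw [idx_outer_get _ _ (fun t ht => hR t (List.mem_reverse.1 ht))]
  cases R with
  | nil => rfl
  | cons t rest => simp [List.getLast?_reverse]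

-- ===== VERDICT (by name: the statement is the Claim_ definition above) =====
theorem query_select_spec : Claim_equal_query_select := by
  intro sample _
  have hRmem : ∀ t ∈ query_relations sample, t ∈ tables :=
    fun t ht => query_relations_mem sample t ht
  have hR : ∀ t ∈ query_relations sample, (cols t).contains "name_id" = true :=
    fun t ht => cols_name_id t (hRmem t ht)
  have hRB : ∀ t ∈ query_relations sample, (colsB t).contains "name_id" = true :=
    fun t ht => by rw [colsB_eq_cols t (hRmem t ht)]; exact hR t ht
  simp only [Spec_query_select, query_select, query_select_alt, relationsB_eq]
  rw [outerA_char _ hR]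
  simp only [desired_output, List.filterMap_cons, List.filterMap_nil]
  rw [buildIdx_get _ hRB]
  have hany : (sample.any (fun kv => kv.1 == "name_id")) = true ↔
      "name_id" ∈ sample.map Prod.fst := by
    simp [List.any_eq_true, beq_iff_eq, List.mem_map]
  by_cases hmem : "name_id" ∈ sample.map Prod.fst
  · have hks : "name_id" ∈ sampleKeys sample := (mem_sampleKeys sample _).2 hmem
    rw [if_pos hks, if_pos (hany.2 hmem)]
    cases query_relations sample with
    | nil => rfl
    | cons t rest => rfl
  · have hks : "name_id" ∉ sampleKeys sample := fun h => hmem ((mem_sampleKeys sample _).1 h)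
    rw [if_neg hks, if_neg (fun h => hmem (hany.1 h))]
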